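-- pv_equiv track=rewrite | github.com/vivekkns/BigO | algo/prog/array_k_repetition.py | find_k_repetition
-- ===== SOURCE A (Python) =====
-- def find_k_repetition(A, k):
--     d = dict()
--     for a in A:
--         if a in d:
--             d[a] += 1
--             if d[a] >= k:
--                 return True
--         else:
--             d[a] = 1
--     return False
-- ===== SOURCE B (Python) =====
-- def find_k_repetition(A, k):
--     if k <= 0:
--         return True
--     s = sorted(A)
--     return any(s[i] == s[i + k - 1] for i in range(len(s) - k + 1))
-- ===== Notes on version B (the rewrite author's own statement) =====
-- stated objective: alternative
-- what changed: A counts occurrences in a dict with an early-exit test after each increment; B sorts the list and scans one window of width k over the sorted list (s[i] == s[i+k-1]), using no counting structure at all.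
-- intended difference: For k <= 1 on duplicate-free lists (nonempty when k = 1) A returns False because it only tests a count after an increment (its effective threshold is max(k,2)), while B returns True, the intended value since every element trivially appears at least k <= 1 times. — e.g. on find_k_repetition([3], 1): A returns false, B returns true
import Mathlib
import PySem

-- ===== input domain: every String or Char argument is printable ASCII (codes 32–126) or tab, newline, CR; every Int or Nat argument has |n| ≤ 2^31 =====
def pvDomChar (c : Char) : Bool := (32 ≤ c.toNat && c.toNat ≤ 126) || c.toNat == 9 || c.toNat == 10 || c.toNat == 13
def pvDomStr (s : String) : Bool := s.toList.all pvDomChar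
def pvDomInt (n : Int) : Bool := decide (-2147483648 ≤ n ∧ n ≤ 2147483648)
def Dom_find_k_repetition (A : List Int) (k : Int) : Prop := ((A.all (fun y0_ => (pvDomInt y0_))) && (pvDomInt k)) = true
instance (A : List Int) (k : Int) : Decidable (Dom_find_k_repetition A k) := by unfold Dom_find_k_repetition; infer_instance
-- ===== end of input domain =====

-- B replaces A's dict-counting early-exit loop by sort-then-window-scan: sort the list,
-- then ask whether some window of width k has equal endpoints; objective: alternative algorithm.

-- ===== PORT A =====
-- A's loop: dict of counts so far, early return True when an incremented count reaches k.
def findKRepLoopA (k : Int) : PySem.Dict Int Int → List Int → Bool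
  | _, [] => false
  | d, a :: rest =>
    match d.get? a with
    | some v =>
      if v + 1 ≥ k then true
      else findKRepLoopA k (d.insert a (v + 1)) rest
    | none => findKRepLoopA k (d.insert a 1) rest

def find_k_repetition (A : List Int) (k : Int) : Bool :=
  findKRepLoopA k PySem.Dict.empty A

-- ===== PORT B =====
-- Source B: guard k <= 0, sort, then any(s[i] == s[i+k-1] for i in range(len(s)-k+1)).
-- Indices are always in range here (0 ≤ i ≤ len-k, k ≥ 1), so pyGetD is exact.
def find_k_repetition_alt (A : List Int) (k : Int) : Bool :=
  if k ≤ 0 then true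
  else
    let s := PySem.List.sorted A (fun x => x) false
    (PySem.List.pyRange 0 ((s.length : Int) - k + 1) 1).any (fun i =>
      PySem.List.pyGetD s i 0 == PySem.List.pyGetD s (i + k - 1) 0)

-- ===== PRECONDITION & SPEC =====
-- For k ≤ 1 on duplicate-free lists (nonempty when k = 1) A returns False because it only
-- tests a count after an increment (its effective threshold is max(k,2)), while B returns
-- True, the intended value since every element trivially appears at least k ≤ 1 times.
def D_find_k_repetition (A : List Int) (k : Int) : Prop :=
  A.Nodup ∧ (k ≤ 0 ∨ (k = 1 ∧ A ≠ []))
instance (A : List Int) (k : Int) : Decidable (D_find_k_repetition A k) := by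
  unfold D_find_k_repetition; infer_instance

def Spec_find_k_repetition (A : List Int) (k : Int) (out : Bool) : Prop :=
  ¬ D_find_k_repetition A k → out = find_k_repetition_alt A k
instance (A : List Int) (k : Int) (out : Bool) : Decidable (Spec_find_k_repetition A k out) := by
  unfold Spec_find_k_repetition; infer_instance

def pvDiffWitness_find_k_repetition : List Int × Int := ([3], 1)
def pvDiffWitnessOut_find_k_repetition : Bool × Bool := (false, true)

-- ===== CLAIM (what is proved, stated in full; the proofs are below) =====
def Claim_unchanged_find_k_repetition : Prop := ∀ (A : List Int) (k : Int), Dom_find_k_repetition A k → Spec_find_k_repetition A k (find_k_repetition A k)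
def Claim_changed_find_k_repetition : Prop := Dom_find_k_repetition (pvDiffWitness_find_k_repetition.1) (pvDiffWitness_find_k_repetition.2) ∧ D_find_k_repetition (pvDiffWitness_find_k_repetition.1) (pvDiffWitness_find_k_repetition.2) ∧ find_k_repetition (pvDiffWitness_find_k_repetition.1) (pvDiffWitness_find_k_repetition.2) = pvDiffWitnessOut_find_k_repetition.1 ∧ find_k_repetition_alt (pvDiffWitness_find_k_repetition.1) (pvDiffWitness_find_k_repetition.2) = pvDiffWitnessOut_find_k_repetition.2 ∧ pvDiffWitnessOut_find_k_repetition.1 ≠ pvDiffWitnessOut_find_k_repetition.2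
def Claim_exact_find_k_repetition : Prop := ∀ (A : List Int) (k : Int), Dom_find_k_repetition A k → D_find_k_repetition A k → find_k_repetition A k ≠ find_k_repetition_alt A k

-- ===== LEMMAS AND PROOFS =====

-- ---- A-side characterisation ----

def GoodCounts (d : PySem.Dict Int Int) : Prop :=
  ∀ a v, d.get? a = some v → 1 ≤ v

lemma goodCounts_empty : GoodCounts PySem.Dict.empty := by
  intro a v h
  simp [PySem.Dict.get?_empty] at h

lemma goodCounts_insert {d : PySem.Dict Int Int} (hd : GoodCounts d) {k : Int} {v : Int}
    (hv : 1 ≤ v) : GoodCounts (d.insert k v) := by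
  intro a w h
  rw [PySem.Dict.get?_insert] at h
  split at h
  · cases h; exact hv
  · exact hd a w h

def dcount (d : PySem.Dict Int Int) (a : Int) : Int := (d.get? a).getD 0

lemma dcount_insert (d : PySem.Dict Int Int) (k v a : Int) :
    dcount (d.insert k v) a = if a = k then v else dcount d a := by
  unfold dcount
  rw [PySem.Dict.get?_insert]
  split <;> rfl

lemma loopA_iff (k : Int) (l : List Int) :
    ∀ d : PySem.Dict Int Int, GoodCounts d →
    (findKRepLoopA k d l = true ↔
      ∃ a ∈ l, 2 ≤ dcount d a + l.count a ∧ k ≤ dcount d a + l.count a) := by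
  induction l with
  | nil => intro d _; simp [findKRepLoopA]
  | cons a rest ih =>
    intro d hd
    have hca : (List.count a (a :: rest) : Int) = (rest.count a : Int) + 1 := by
      simp
    cases hget : d.get? a with
    | some v =>
      have hv : 1 ≤ v := hd a v hget
      have hda : dcount d a = v := by unfold dcount; rw [hget]; rfl
      by_cases hk : v + 1 ≥ k
      · constructor
        · intro _
          refine ⟨a, by simp, ?_, ?_⟩
          · rw [hda, hca]; have : (0:Int) ≤ rest.count a := by positivity
            omega
          · rw [hda, hca]; have : (0:Int) ≤ rest.count a := by positivity
            omega
        · intro _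
          simp [findKRepLoopA, hget, hk]
      · have hgood' : GoodCounts (d.insert a (v + 1)) := goodCounts_insert hd (by omega)
        have hstep : findKRepLoopA k d (a :: rest) = findKRepLoopA k (d.insert a (v + 1)) rest := by
          simp [findKRepLoopA, hget, hk]
        rw [hstep, ih _ hgood']
        constructor
        · rintro ⟨x, hx, h2, hk2⟩
          refine ⟨x, List.mem_cons_of_mem _ hx, ?_, ?_⟩ <;>
          · rw [dcount_insert] at h2 hk2
            by_cases hxa : x = a
            · subst hxa; rw [hda, hca]; simp at h2 hk2; omega
            · simp [hxa] at h2 hk2; simp [List.count_cons]; omega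
        · rintro ⟨x, hx, h2, hk2⟩
          by_cases hxa : x = a
          · subst hxa
            rw [hda, hca] at h2 hk2
            have hrest : 1 ≤ (rest.count x : Int) := by omega
            refine ⟨x, ?_, ?_, ?_⟩
            · exact List.count_pos_iff.mp (by exact_mod_cast hrest)
            · rw [dcount_insert]; simp; omega
            · rw [dcount_insert]; simp; omega
          · have hx' : x ∈ rest := by
              rcases List.mem_cons.mp hx with h | h
              · exact absurd h hxa
              · exact h
            refine ⟨x, hx', ?_, ?_⟩ <;>
            · rw [dcount_insert]; simp [hxa]
              simp [List.count_cons] at h2 hk2; omega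
    | none =>
      have hda : dcount d a = 0 := by unfold dcount; rw [hget]; rfl
      have hgood' : GoodCounts (d.insert a 1) := goodCounts_insert hd (by omega)
      have hstep : findKRepLoopA k d (a :: rest) = findKRepLoopA k (d.insert a 1) rest := by
        simp [findKRepLoopA, hget]
      rw [hstep, ih _ hgood']
      constructor
      · rintro ⟨x, hx, h2, hk2⟩
        refine ⟨x, List.mem_cons_of_mem _ hx, ?_, ?_⟩ <;>
        · rw [dcount_insert] at h2 hk2
          by_cases hxa : x = a
          · subst hxa; rw [hda, hca]; simp at h2 hk2; omega
          · simp [hxa] at h2 hk2; simp [List.count_cons]; omega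
      · rintro ⟨x, hx, h2, hk2⟩
        by_cases hxa : x = a
        · subst hxa
          rw [hda, hca] at h2 hk2
          have hrest : 1 ≤ (rest.count x : Int) := by omega
          refine ⟨x, ?_, ?_, ?_⟩
          · exact List.count_pos_iff.mp (by exact_mod_cast hrest)
          · rw [dcount_insert]; simp; omega
          · rw [dcount_insert]; simp; omega
        · have hx' : x ∈ rest := by
            rcases List.mem_cons.mp hx with h | h
            · exact absurd h hxa
            · exact h
          refine ⟨x, hx', ?_, ?_⟩ <;>
          · rw [dcount_insert]; simp [hxa]
            simp [List.count_cons] at h2 hk2; omega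

lemma portA_iff (A : List Int) (k : Int) :
    (find_k_repetition A k = true ↔ ∃ a ∈ A, 2 ≤ (A.count a : Int) ∧ k ≤ (A.count a : Int)) := by
  unfold find_k_repetition
  rw [loopA_iff k A PySem.Dict.empty goodCounts_empty]
  constructor <;>
  · rintro ⟨a, ha, h2, hk2⟩
    refine ⟨a, ha, ?_, ?_⟩ <;>
    · simp only [dcount, PySem.Dict.get?_empty, Option.getD_none, zero_add] at *
      omega

-- ---- B-side characterisation ----

lemma sorted_decomp (s : List Int) (hs : s.Pairwise (· ≤ ·)) (a : Int) :
    s = s.filter (fun b => decide (b < a)) ++ (List.replicate (s.count a) a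
          ++ s.filter (fun b => decide (a < b))) := by
  have hperm : (s.filter (fun b => decide (b < a)) ++ (List.replicate (s.count a) a
      ++ s.filter (fun b => decide (a < b)))).Perm s := by
    have h1 : (s.filter (fun b => decide (b < a)) ++ s.filter (fun b => !(decide (b < a)))).Perm s :=
      List.filter_append_perm _ s
    have h2 : (List.filter (fun b => b == a) (s.filter (fun b => !(decide (b < a)))) ++
        List.filter (fun b => !(b == a)) (s.filter (fun b => !(decide (b < a))))).Perm
        (s.filter (fun b => !(decide (b < a)))) := List.filter_append_perm _ _
    have e1 : List.filter (fun b => b == a) (s.filter (fun b => !(decide (b < a)))) =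
        List.replicate (s.count a) a := by
      rw [List.filter_filter]
      have : (fun b : Int => (b == a) && !(decide (b < a))) = (fun b : Int => b == a) := by
        funext b
        by_cases h : b = a
        · simp [h]
        · simp [h]
      rw [this, List.filter_beq]
    have e2 : List.filter (fun b => !(b == a)) (s.filter (fun b => !(decide (b < a)))) =
        s.filter (fun b => decide (a < b)) := by
      rw [List.filter_filter]
      apply List.filter_congr
      intro b _
      by_cases h2 : b = a
      · simp [h2]
      · by_cases h1 : b < a
        · simp [h1, show ¬ a < b by omega]
        · simp [h1, h2, show a < b by omega]
    rw [e1, e2] at h2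
    exact (List.Perm.append_left _ h2).trans h1
  have hsorted : (s.filter (fun b => decide (b < a)) ++ (List.replicate (s.count a) a
      ++ s.filter (fun b => decide (a < b)))).Pairwise (· ≤ ·) := by
    rw [List.pairwise_append, List.pairwise_append]
    refine ⟨hs.filter _, ⟨?_, hs.filter _, ?_⟩, ?_⟩
    · rw [List.pairwise_replicate]; right; exact le_refl a
    · intro x hx y hy
      rw [List.mem_replicate] at hx
      rw [List.mem_filter] at hy
      have := hy.2; simp at this; omega
    · intro x hx y hy
      rw [List.mem_filter] at hx
      have hx2 := hx.2; simp at hx2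
      rcases List.mem_append.mp hy with h | h
      · rw [List.mem_replicate] at h; omega
      · rw [List.mem_filter] at h; have := h.2; simp at this; omega
  exact (List.Perm.eq_of_pairwise (fun a b _ _ h1 h2 => le_antisymm h1 h2) hsorted hs hperm).symm

lemma window_iff_count (s : List Int) (hs : s.Pairwise (· ≤ ·)) (K : Nat) (hK : 1 ≤ K) :
    (∃ j : Nat, j + K ≤ s.length ∧ ∃ hj : j < s.length, ∃ hj' : j + K - 1 < s.length,
        s[j] = s[j + K - 1]) ↔ ∃ a ∈ s, K ≤ s.count a := by
  constructor
  · rintro ⟨j, hjK, hj, hj', heq⟩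
    refine ⟨s[j], List.getElem_mem hj, ?_⟩
    have hmono := List.pairwise_iff_getElem.mp hs
    have hseg : ((s.drop j).take K).Sublist s :=
      ((s.drop j).take_sublist K).trans (s.drop_sublist j)
    have hlenseg : ((s.drop j).take K).length = K := by
      simp; omega
    have hall : ∀ b ∈ (s.drop j).take K, s[j] = b := by
      intro b hb
      rcases List.mem_iff_getElem.mp hb with ⟨m, hm, rfl⟩
      have hmK : m < K := by omega
      rw [List.getElem_take, List.getElem_drop]
      have h1 : s[j] ≤ s[j + m]'(by omega) := by
        rcases Nat.eq_zero_or_pos m with h0 | h0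
        · subst h0; simp
        · exact hmono j (j + m) (by omega) (by omega) (by omega)
      have h2 : s[j + m]'(by omega) ≤ s[j + K - 1] := by
        rcases Nat.lt_or_ge m (K - 1) with h0 | h0
        · exact hmono (j + m) (j + K - 1) (by omega) (by omega) (by omega)
        · exact le_of_eq (by congr 1; omega)
      exact le_antisymm h1 (h2.trans heq.ge)
    have hcount : ((s.drop j).take K).count s[j] = K := by
      rw [List.count_eq_length.mpr hall, hlenseg]
    calc K = ((s.drop j).take K).count s[j] := hcount.symm
      _ ≤ s.count s[j] := hseg.count_le _
  · rintro ⟨a, hmem, hcnt⟩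
    have hdec := sorted_decomp s hs a
    rw [hdec]
    set L := s.filter (fun b => decide (b < a)) with hL
    set G := s.filter (fun b => decide (a < b)) with hG
    set c := s.count a with hc
    have hlen : (L ++ (List.replicate c a ++ G)).length = L.length + c + G.length := by
      simp; omega
    refine ⟨L.length, by omega, by omega, by omega, ?_⟩
    have h1 : (L ++ (List.replicate c a ++ G))[L.length]'(by omega) = a := by
      rw [List.getElem_append_right (le_refl _), List.getElem_append_left (by simp; omega)]
      simp
    have h2 : (L ++ (List.replicate c a ++ G))[L.length + K - 1]'(by omega) = a := by
      rw [List.getElem_append_right (by omega), List.getElem_append_left (by simp; omega)]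
      simp
    rw [h1, h2]

lemma portB_iff (A : List Int) (k : Int) (hk : 1 ≤ k) :
    (find_k_repetition_alt A k = true ↔ ∃ a ∈ A, k ≤ (A.count a : Int)) := by
  have hknot : ¬ k ≤ 0 := by omega
  unfold find_k_repetition_alt
  rw [if_neg hknot]
  have hs : (PySem.List.sorted A (fun x => x) false).Pairwise (· ≤ ·) := by
    simpa using PySem.List.sorted_pairwise A (fun x => x)
  have hperm : (PySem.List.sorted A (fun x => x) false).Perm A :=
    PySem.List.sorted_perm A (fun x => x) false
  set s := PySem.List.sorted A (fun x => x) false with hsdef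
  have hwin := window_iff_count s hs k.toNat (by omega)
  rw [List.any_eq_true]
  constructor
  · rintro ⟨i, hi, hEq⟩
    rw [PySem.List.mem_pyRange_one] at hi
    obtain ⟨hi0, hi1⟩ := hi
    rw [PySem.List.pyGetD_eq_getElem s 0 (by omega) (by omega),
        PySem.List.pyGetD_eq_getElem s 0 (by omega) (by omega)] at hEq
    have heq : s[i.toNat]'(by omega) = s[(i + k - 1).toNat]'(by omega) := by
      simpa using hEq
    obtain ⟨a, ha, hcnt⟩ := hwin.mp ⟨i.toNat, by omega, by omega, by omega, by
      rw [heq]; congr 1; omega⟩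
    refine ⟨a, hperm.mem_iff.mp ha, ?_⟩
    rw [← hperm.count_eq]
    omega
  · rintro ⟨a, ha, hcnt⟩
    obtain ⟨j, hjK, hj, hj', heq⟩ := hwin.mpr ⟨a, hperm.mem_iff.mpr ha, by
      rw [hperm.count_eq]; omega⟩
    refine ⟨(j : Int), ?_, ?_⟩
    · rw [PySem.List.mem_pyRange_one]
      omega
    · rw [PySem.List.pyGetD_eq_getElem s 0 (by omega) (by omega),
          PySem.List.pyGetD_eq_getElem s 0 (by omega) (by omega)]
      simp only [beq_iff_eq, Int.toNat_natCast]
      rw [heq]; congr 1; omega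

-- ===== VERDICT (by name: the statement is the Claim_ definition above) =====
theorem find_k_repetition_spec : Claim_unchanged_find_k_repetition := by
  intro A k _
  unfold Spec_find_k_repetition
  intro hnD
  rcases (by omega : k ≤ 0 ∨ 0 < k) with hk | hk
  · -- k ≤ 0: ¬D_ forces a duplicate; both sides are true
    have hnd : ¬ A.Nodup := fun h => hnD ⟨h, Or.inl hk⟩
    obtain ⟨a, ha2⟩ : ∃ a, 2 ≤ A.count a := by
      rw [List.nodup_iff_count_le_one] at hnd
      rw [not_forall] at hnd
      obtain ⟨a, ha⟩ := hnd
      exact ⟨a, by omega⟩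
    have hmem : a ∈ A := List.count_pos_iff.mp (by omega)
    have hA : find_k_repetition A k = true :=
      (portA_iff A k).mpr ⟨a, hmem, by exact_mod_cast ha2, by
        have : (0:Int) ≤ (A.count a : Int) := by positivity
        omega⟩
    have hB : find_k_repetition_alt A k = true := by
      unfold find_k_repetition_alt
      rw [if_pos hk]
    rw [hA, hB]
  · rcases (by omega : (1:Int) = k ∨ 1 < k) with hk1 | hk2
    · -- k = 1: ¬D_ forces A = [] or a duplicate
      rcases Classical.em (A = []) with hnil | hne
      · subst hnil
        rw [← hk1]
        rfl
      · have hnd : ¬ A.Nodup := fun h => hnD ⟨h, Or.inr ⟨hk1.symm, hne⟩⟩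
        obtain ⟨a, ha2⟩ : ∃ a, 2 ≤ A.count a := by
          rw [List.nodup_iff_count_le_one] at hnd
          rw [not_forall] at hnd
          obtain ⟨a, ha⟩ := hnd
          exact ⟨a, by omega⟩
        have hmem : a ∈ A := List.count_pos_iff.mp (by omega)
        have hA : find_k_repetition A k = true :=
          (portA_iff A k).mpr ⟨a, hmem, by exact_mod_cast ha2, by
            rw [← hk1]; exact_mod_cast le_trans (by omega) ha2⟩
        have hB : find_k_repetition_alt A k = true :=
          (portB_iff A k (by omega)).mpr ⟨a, hmem, by rw [← hk1]; exact_mod_cast le_trans (by omega) ha2⟩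
        rw [hA, hB]
    · -- k ≥ 2: the two characterisations coincide
      apply Bool.eq_iff_iff.mpr
      rw [portA_iff, portB_iff A k (by omega)]
      constructor
      · rintro ⟨a, ha, _, hkc⟩
        exact ⟨a, ha, hkc⟩
      · rintro ⟨a, ha, hkc⟩
        exact ⟨a, ha, by omega, hkc⟩

theorem find_k_repetition_changed : Claim_changed_find_k_repetition := by
  unfold Claim_changed_find_k_repetition; decide

theorem find_k_repetition_tight : Claim_exact_find_k_repetition := by
  intro A k _ hD
  obtain ⟨hnd, hcase⟩ := hD
  have hA : find_k_repetition A k ≠ true := by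
    intro h
    obtain ⟨a, _, h2, _⟩ := (portA_iff A k).mp h
    have := List.nodup_iff_count_le_one.mp hnd a
    omega
  have hB : find_k_repetition_alt A k = true := by
    rcases hcase with hk | ⟨hk1, hne⟩
    · unfold find_k_repetition_alt
      rw [if_pos hk]
    · obtain ⟨a, ha⟩ := List.exists_mem_of_ne_nil A hne
      refine (portB_iff A k (by omega)).mpr ⟨a, ha, ?_⟩
      have : 0 < A.count a := List.count_pos_iff.mpr ha
      omega
  intro h
  rw [hB] at h
  exact hA h
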